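-- pv_equiv track=rewrite | github.com/gesadiputra/Simple-Chatbot | main.py | botLev
-- ===== SOURCE A (Python) =====
-- def levenhstein(base,comp):
--     if base == comp: return 0
--     elif len(base) == 0: return len(comp)
--     elif len(comp) == 0: return len(base)
--     v0 = [None] * (len(comp) + 1)
--     v1 = [None] * (len(comp) + 1)
--     for i in range(len(v0)):
--         v0[i] = i
--     for i in range(len(base)):
--         v1[0] = i + 1
--         for j in range(len(comp)):
--             cost = 0 if base[i] == comp[j] else 1
--             v1[j + 1] = min(v1[j] + 1, v0[j + 1] + 1, v0[j] + cost)
--         for j in range(len(v0)):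
--             v0[j] = v1[j]
--
--     return v1[len(comp)]
--
-- def botLev(string):
--     words = string.split()
--
--     patterns = [
--         ['action','sliceoflife','horror','romance'],    # 0 = genre
--         ['rekomendasi','saran']                         # 1 = minta rekomendasi
--     ]
--
--     result = []
--     for word in words:
--         min = 9999
--         id = -1
--         jd = -1
--
--         for index, pattern in enumerate(patterns):
--             for jndex, item in enumerate(pattern):
--                 lev = levenhstein(word,item)
--
--                 if(lev < min):
--                     min = lev
--                     id = index
--                     jd = jndex
--
--         if id != -1 and jd != -1:
--             result.append([id,jd])
--
--     return result
-- ===== SOURCE B (Python) =====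
-- def levenhstein(base, comp):
--     # Column DP recursing on `comp`: col(b)[i] = edit distance between base[i:] and b.
--     n = len(base)
--
--     def col(b):
--         if not b:
--             return list(range(n, -1, -1))
--         prev = col(b[1:])
--         y = b[0]
--         out = [prev[n] + 1]  # entry for i = n, column built back-to-front
--         for i in range(n - 1, -1, -1):
--             out.append(min(out[-1] + 1, prev[i] + 1,
--                            prev[i + 1] + (0 if base[i] == y else 1)))
--         out.reverse()
--         return out
--
--     return col(comp)[0]
--
--
-- CUTOFF = 9999  # a word matches a pattern only within this edit distance
--
-- PATTERNS = [
--     ['action', 'sliceoflife', 'horror', 'romance'],  # 0 = genre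
--     ['rekomendasi', 'saran']                         # 1 = minta rekomendasi
-- ]
--
-- FLAT = [(pi, wi, item) for pi, pat in enumerate(PATTERNS) for wi, item in enumerate(pat)]
--
--
-- def botLev(string):
--     result = []
--     for word in string.split():
--         close = [(d, pi, wi) for pi, wi, item in FLAT
--                  if (d := levenhstein(word, item)) < CUTOFF]
--         if close:
--             _, pi, wi = min(close)
--             result.append([pi, wi])
--     return result
-- ===== Notes on version B (the rewrite author's own statement) =====
-- stated objective: alternative
-- what changed: The edit-distance helper is re-decomposed as a recursive column construction over the pattern (each call extends the column of suffix distances by one pattern character, filled back-to-front) instead of A's imperative two-row table iterated over the word, and A's sentinel min/id/jd accumulator loop is replaced by filtering the flattened (distance, i, j) candidates to those within the cutoff and taking their lexicographic minimum.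
import Mathlib
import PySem

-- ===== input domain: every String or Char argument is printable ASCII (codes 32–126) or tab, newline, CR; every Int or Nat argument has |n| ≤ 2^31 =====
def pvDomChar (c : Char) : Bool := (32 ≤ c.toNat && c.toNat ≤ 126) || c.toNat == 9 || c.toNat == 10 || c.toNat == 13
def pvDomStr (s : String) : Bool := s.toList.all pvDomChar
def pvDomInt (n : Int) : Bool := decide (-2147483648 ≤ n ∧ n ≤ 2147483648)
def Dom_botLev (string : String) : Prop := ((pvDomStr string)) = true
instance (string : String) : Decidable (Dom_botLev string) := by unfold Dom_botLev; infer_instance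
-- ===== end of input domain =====

set_option maxHeartbeats 2000000
set_option maxRecDepth 8000


-- B replaces A's iterative two-row Levenshtein (rows built along the word) by a recursive
-- column construction along the pattern, and A's sentinel min/id/jd loop by a cutoff filter
-- plus lexicographic minimum over the flattened candidates; objective: alternative.

-- `0 if a == b else 1`, the cost expression both Pythons write inline
def pvCost (x y : Char) : Nat := if x == y then 0 else 1

-- ===== PORT A =====
-- inner loop `for j in range(len(comp))`: walks comp and v0 together (v0.getD 0 = v0[j],
-- v0.getD 1 = v0[j+1]); prev is v1[j], the entry written just before
def levInnerA (x : Char) : List Char → List Nat → Nat → List Nat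
  | [], _, _ => []
  | y :: ys, v0, prev =>
    let cur := min (min (prev + 1) (v0.getD 1 0 + 1)) (v0.getD 0 0 + pvCost x y)
    cur :: levInnerA x ys v0.tail cur

def levOuterA (comp : List Char) : List Char → List Nat → Nat → List Nat
  | [], v0, _ => v0
  | x :: xs, v0, i => levOuterA comp xs ((i + 1) :: levInnerA x comp v0 (i + 1)) (i + 1)

def levA (base comp : List Char) : Nat :=
  if base = comp then 0
  else if base.length = 0 then comp.length
  else if comp.length = 0 then base.length
  else ((levOuterA comp base (List.range (comp.length + 1)) 0).getD comp.length 0)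

def botPatterns : List (List String) :=
  [["action", "sliceoflife", "horror", "romance"], ["rekomendasi", "saran"]]

-- body of A's `for word in words` loop (min/id/jd accumulator, then the conditional append)
def botLevStepA (result : List (List Int)) (word : String) : List (List Int) :=
  let st := (PySem.List.enumerate botPatterns 0).foldl (fun st ip =>
      (PySem.List.enumerate ip.2 0).foldl (fun st jp =>
        let l : Int := (levA word.toList jp.2.toList : Nat)
        if l < st.1 then (l, ip.1, jp.1) else st) st) ((9999 : Int), (-1 : Int), (-1 : Int))
  if st.2.1 ≠ -1 ∧ st.2.2 ≠ -1 then result ++ [[st.2.1, st.2.2]] else result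

def botLev (string : String) : List (List Int) :=
  (PySem.Str.split₀ string).foldl botLevStepA []

-- ===== PORT B =====
-- Source B's backwards loop `for i in range(len(base)-1, -1, -1)` building the column
-- back-to-front, as the structural recursion over base computing the tail entries first
def colStepB (y : Char) : List Char → List Nat → List Nat
  | [], prev => [prev.headD 0 + 1]
  | x :: xs, prev =>
    let rest := colStepB y xs prev.tail
    (min (min (rest.headD 0 + 1) (prev.headD 0 + 1)) (prev.tail.headD 0 + pvCost x y)) :: rest

def colB (a : List Char) : List Char → List Nat
  | [] => (List.range (a.length + 1)).map (fun k => a.length - k)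
  | y :: ys => colStepB y a (colB a ys)

def levB (a b : List Char) : Nat := (colB a b).headD 0

-- Python tuple comparison (d, pi, wi) < (d', pi', wi')
def tripLt (a b : Int × Int × Int) : Bool :=
  a.1 < b.1 || (a.1 == b.1 && (a.2.1 < b.2.1 || (a.2.1 == b.2.1 && a.2.2 < b.2.2)))

-- Source B's FLAT = [(pi, wi, item) ...] comprehension
def botFlat : List (Int × Int × String) :=
  (PySem.List.enumerate botPatterns 0).flatMap (fun ip =>
    (PySem.List.enumerate ip.2 0).map (fun jp => (ip.1, jp.1, jp.2)))

-- Source B's `if close:` block: append the first lexicographic minimum of the nonempty candidates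
def pickClose (result : List (List Int)) : List (Int × Int × Int) → List (List Int)
  | [] => result
  | c :: cs =>
    result ++ [[(cs.foldl (fun b c => if tripLt c b then c else b) c).2.1,
      (cs.foldl (fun b c => if tripLt c b then c else b) c).2.2]]

-- body of B's `for word in string.split()` loop: the `close` comprehension (map + filter
-- against the CUTOFF = 9999 constant), then the `if close:` block
def botLevStepB (result : List (List Int)) (word : String) : List (List Int) :=
  pickClose result ((botFlat.map (fun t =>
      (((levB word.toList t.2.2.toList : Nat) : Int), t.1, t.2.1))).filter
      (fun c => decide (c.1 < 9999)))

def botLev_alt (string : String) : List (List Int) :=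
  (PySem.Str.split₀ string).foldl botLevStepB []

-- ===== PRECONDITION & SPEC =====
def Spec_botLev (string : String) (out : List (List Int)) : Prop := out = botLev_alt string
instance (string : String) (out : List (List Int)) : Decidable (Spec_botLev string out) := by unfold Spec_botLev; infer_instance

-- ===== CLAIM (what is proved, stated in full; the proofs are below) =====
def Claim_equal_botLev : Prop := ∀ (string : String), Dom_botLev string → Spec_botLev string (botLev string)

-- ===== LEMMAS AND PROOFS =====

-- reference Levenshtein distance (head recursion); both ports are proved equal to it
def lev : List Char → List Char → Nat
  | [], b => b.length
  | a, [] => a.length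
  | x :: xs, y :: ys =>
    min (min (lev xs (y :: ys) + 1) (lev (x :: xs) ys + 1)) (lev xs ys + pvCost x y)
termination_by a b => a.length + b.length
decreasing_by all_goals (simp only [List.length_cons]; omega)

lemma lev_nil_left (b : List Char) : lev [] b = b.length := by cases b <;> simp [lev]
lemma lev_nil_right (a : List Char) : lev a [] = a.length := by cases a <;> simp [lev]
lemma lev_cons_cons (x y : Char) (xs ys : List Char) :
    lev (x :: xs) (y :: ys)
      = min (min (lev xs (y :: ys) + 1) (lev (x :: xs) ys + 1)) (lev xs ys + pvCost x y) := by
  simp [lev]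

lemma lev_self (a : List Char) : lev a a = 0 := by
  induction a with
  | nil => simp [lev]
  | cons x xs ih => rw [lev_cons_cons, ih]; simp [pvCost]

lemma lev_singleton_left (x : Char) (b : List Char) :
    lev [x] b = if x ∈ b then b.length - 1 else max b.length 1 := by
  induction b with
  | nil => simp [lev_nil_right]
  | cons z zs ih =>
    rw [lev_cons_cons, lev_nil_left, lev_nil_left, ih]
    simp only [pvCost, beq_iff_eq, List.mem_cons, List.length_cons]
    by_cases hm : x ∈ zs <;> by_cases hxz : x = z
    · rw [if_pos hm, if_pos (show x = z ∨ x ∈ zs from Or.inl hxz), if_pos hxz]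
      have := List.length_pos_of_mem hm; omega
    · rw [if_pos hm, if_pos (show x = z ∨ x ∈ zs from Or.inr hm), if_neg hxz]
      have := List.length_pos_of_mem hm; omega
    · rw [if_neg hm, if_pos (show x = z ∨ x ∈ zs from Or.inl hxz), if_pos hxz]; omega
    · rw [if_neg hm, if_neg (show ¬(x = z ∨ x ∈ zs) by tauto), if_neg hxz]; omega

lemma lev_singleton_right (a : List Char) (y : Char) :
    lev a [y] = if y ∈ a then a.length - 1 else max a.length 1 := by
  induction a with
  | nil => simp [lev_nil_left]
  | cons z zs ih =>
    rw [lev_cons_cons, lev_nil_right, lev_nil_right, ih]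
    simp only [pvCost, beq_iff_eq, List.mem_cons, List.length_cons]
    by_cases hm : y ∈ zs <;> by_cases hzy : z = y
    · rw [if_pos hm, if_pos (show y = z ∨ y ∈ zs from Or.inr hm), if_pos hzy]
      have := List.length_pos_of_mem hm; omega
    · rw [if_pos hm, if_pos (show y = z ∨ y ∈ zs from Or.inr hm), if_neg hzy]
      have := List.length_pos_of_mem hm; omega
    · rw [if_neg hm, if_pos (show y = z ∨ y ∈ zs from Or.inl hzy.symm), if_pos hzy]; omega
    · rw [if_neg hm, if_neg (show ¬(y = z ∨ y ∈ zs) by rintro (h | h); exact hzy h.symm; exact hm h),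
        if_neg hzy]; omega

lemma min_transpose9 (a1 a2 a3 b1 b2 b3 c1 c2 c3 : Nat) :
    min (min (min (min a1 a2) a3) (min (min b1 b2) b3)) (min (min c1 c2) c3)
  = min (min (min (min a1 b1) c1) (min (min a2 b2) c2)) (min (min a3 b3) c3) := by
  apply le_antisymm <;> (simp only [le_min_iff, min_le_iff]; omega)

lemma lev_append (x y : Char) (a b : List Char) :
    lev (a ++ [x]) (b ++ [y])
      = min (min (lev a (b ++ [y]) + 1) (lev (a ++ [x]) b + 1)) (lev a b + pvCost x y) := by
  suffices H : ∀ n (a b : List Char), a.length + b.length = n →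
      lev (a ++ [x]) (b ++ [y])
        = min (min (lev a (b ++ [y]) + 1) (lev (a ++ [x]) b + 1)) (lev a b + pvCost x y) by
    exact H (a.length + b.length) a b rfl
  intro n
  induction n using Nat.strong_induction_on with
  | _ n ih =>
    intro a b hn
    match a, b with
    | [], b =>
      rw [List.nil_append, lev_singleton_left, lev_nil_left, lev_nil_left, lev_singleton_left]
      simp only [pvCost, beq_iff_eq, List.mem_append, List.mem_singleton, List.length_append,
        List.length_singleton]
      by_cases hm : x ∈ b <;> by_cases hxy : x = y
      · rw [if_pos (show x ∈ b ∨ x = y from Or.inl hm), if_pos hm, if_pos hxy]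
        have := List.length_pos_of_mem hm; omega
      · rw [if_pos (show x ∈ b ∨ x = y from Or.inl hm), if_pos hm, if_neg hxy]
        have := List.length_pos_of_mem hm; omega
      · rw [if_pos (show x ∈ b ∨ x = y from Or.inr hxy), if_neg hm, if_pos hxy]; omega
      · rw [if_neg (show ¬(x ∈ b ∨ x = y) by tauto), if_neg hm, if_neg hxy]; omega
    | u :: us, [] =>
      rw [List.nil_append, lev_singleton_right, lev_nil_right, lev_nil_right, lev_singleton_right]
      simp only [pvCost, beq_iff_eq, List.cons_append, List.mem_cons, List.mem_append,
        List.length_cons, List.length_append, List.length_nil]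
      have hnil : y ∉ ([] : List Char) := by simp
      by_cases hm : y = u ∨ y ∈ us <;> by_cases hxy : x = y
      · rw [if_pos (show y = u ∨ y ∈ us ∨ y = x ∨ y ∈ ([] : List Char) by tauto), if_pos hm,
          if_pos hxy]; omega
      · rw [if_pos (show y = u ∨ y ∈ us ∨ y = x ∨ y ∈ ([] : List Char) by tauto), if_pos hm,
          if_neg hxy]; omega
      · rw [if_pos (show y = u ∨ y ∈ us ∨ y = x ∨ y ∈ ([] : List Char) from
            Or.inr (Or.inr (Or.inl hxy.symm))), if_neg hm, if_pos hxy]; omega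
      · rw [if_neg (show ¬(y = u ∨ y ∈ us ∨ y = x ∨ y ∈ ([] : List Char)) by
            rintro (h | h | h | h)
            · exact hm (Or.inl h)
            · exact hm (Or.inr h)
            · exact hxy h.symm
            · exact hnil h),
          if_neg hm, if_neg hxy]; omega
    | u :: us, v :: vs =>
      have h1 := ih (us.length + (v :: vs).length)
        (by simp only [List.length_cons] at hn ⊢; omega) us (v :: vs) rfl
      have h2 := ih ((u :: us).length + vs.length)
        (by simp only [List.length_cons] at hn ⊢; omega) (u :: us) vs rfl
      have h3 := ih (us.length + vs.length)
        (by simp only [List.length_cons] at hn ⊢; omega) us vs rfl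
      simp only [List.cons_append] at h1 h2 h3 ⊢
      rw [lev_cons_cons u v (us ++ [x]) (vs ++ [y]), h1, h2, h3,
        lev_cons_cons u v us (vs ++ [y]), lev_cons_cons u v (us ++ [x]) vs,
        lev_cons_cons u v us vs]
      simp only [← min_add_add_right]
      simp only [add_assoc, add_comm, add_left_comm]
      apply min_transpose9

-- ===== A-side DP invariants =====

lemma levInnerA_spec (base comp : List Char) (i : Nat) (hi : i < base.length) :
    ∀ (n j : Nat), comp.length - j = n → j ≤ comp.length →
      levInnerA base[i] (comp.drop j)
        ((List.range' j (comp.length + 1 - j)).map (fun k => lev (base.take i) (comp.take k)))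
        (lev (base.take (i + 1)) (comp.take j))
      = (List.range' (j + 1) (comp.length - j)).map
          (fun k => lev (base.take (i + 1)) (comp.take k)) := by
  intro n
  induction n with
  | zero =>
    intro j hn hj
    have hj' : j = comp.length := by omega
    subst hj'
    simp [levInnerA, List.drop_length]
  | succ n ihn =>
    intro j hn hj
    have hjlt : j < comp.length := by omega
    have hdrop : comp.drop j = comp[j] :: comp.drop (j + 1) := List.drop_eq_getElem_cons hjlt
    have hr1 : comp.length + 1 - j = (comp.length - j) + 1 := by omega
    have hr2 : comp.length - j = (comp.length - (j + 1)) + 1 := by omega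
    have hconc : base.take i ++ [base[i]] = base.take (i + 1) := by
      rw [← List.concat_eq_append]; exact List.take_concat_get ..
    have hconc' : comp.take j ++ [comp[j]] = comp.take (j + 1) := by
      rw [← List.concat_eq_append]; exact List.take_concat_get ..
    have hcur : min (min (lev (base.take (i + 1)) (comp.take j) + 1)
          (lev (base.take i) (comp.take (j + 1)) + 1))
          (lev (base.take i) (comp.take j) + pvCost base[i] comp[j])
        = lev (base.take (i + 1)) (comp.take (j + 1)) := by
      rw [Nat.min_comm (lev (base.take (i + 1)) (comp.take j) + 1), ← hconc, ← hconc',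
        lev_append]
    rw [hdrop, hr1, List.range'_succ, List.map_cons]
    simp only [levInnerA, List.tail_cons, List.getD_cons_zero, List.getD_cons_succ]
    rw [hr2, List.range'_succ, List.map_cons]
    simp only [List.getD_cons_zero]
    rw [hcur]
    have e : comp.length + 1 - (j + 1) = (comp.length - (j + 1)) + 1 := by omega
    have ihn' := ihn (j + 1) (by omega) (by omega)
    rw [e, List.range'_succ, List.map_cons] at ihn'
    rw [List.map_cons, ihn']

lemma levOuterA_spec (base comp : List Char) :
    ∀ (xs : List Char) (i : Nat), xs = base.drop i → i ≤ base.length →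
      levOuterA comp xs
        ((List.range' 0 (comp.length + 1)).map (fun k => lev (base.take i) (comp.take k))) i
      = (List.range' 0 (comp.length + 1)).map (fun k => lev base (comp.take k)) := by
  intro xs
  induction xs with
  | nil =>
    intro i hx hi
    have hlen := congrArg List.length hx
    simp only [List.length_nil, List.length_drop] at hlen
    have hi' : i = base.length := by omega
    rw [levOuterA, hi', List.take_length]
  | cons x xs ih =>
    intro i hx hi
    have hlen := congrArg List.length hx
    simp only [List.length_cons, List.length_drop] at hlen
    have hilt : i < base.length := by omega
    have hx0 : base[i] = x := by
      have h1 : (base.drop i).head? = some x := by rw [← hx]; rfl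
      rw [List.head?_drop, List.getElem?_eq_getElem hilt] at h1
      exact Option.some.inj h1
    have hxs : xs = base.drop (i + 1) := by
      have : (base.drop i).drop 1 = base.drop (i + 1) := by
        rw [List.drop_drop]
      rw [← hx] at this; simpa using this
    rw [levOuterA]
    have hlt : (base.take (i + 1)).length = i + 1 := by
      simp only [List.length_take]; omega
    have hinner := levInnerA_spec base comp i hilt comp.length 0 (by omega) (by omega)
    simp only [Nat.sub_zero, List.drop_zero, List.take_zero] at hinner
    rw [hx0, lev_nil_right, hlt] at hinner
    rw [List.range'_succ, List.map_cons] at hinner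
    simp only [Nat.zero_add, List.take_zero] at hinner
    rw [List.range'_succ, List.map_cons]
    simp only [Nat.zero_add, List.take_zero]
    rw [hinner]
    have hv : (i + 1) :: (List.range' 1 comp.length).map
          (fun k => lev (base.take (i + 1)) (comp.take k))
        = (List.range' 0 (comp.length + 1)).map
          (fun k => lev (base.take (i + 1)) (comp.take k)) := by
      rw [List.range'_succ, List.map_cons]
      simp only [Nat.zero_add, List.take_zero]
      congr 1
      rw [lev_nil_right, hlt]
    rw [hv]
    have hgoal := ih (i + 1) hxs (by omega)
    rw [List.range'_succ, List.map_cons] at hgoal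
    simp only [Nat.zero_add, List.take_zero] at hgoal
    exact hgoal

lemma levA_eq (base comp : List Char) : levA base comp = lev base comp := by
  unfold levA
  split_ifs with h1 h2 h3
  · rw [h1, lev_self]
  · rw [List.length_eq_zero_iff] at h2; rw [h2, lev_nil_left]
  · rw [List.length_eq_zero_iff] at h3; rw [h3, lev_nil_right]
  · have hv0 : List.range (comp.length + 1)
        = (List.range' 0 (comp.length + 1)).map (fun k => lev (List.take 0 base) (comp.take k)) := by
      rw [List.range_eq_range']
      conv_lhs => rw [← List.map_id (List.range' 0 (comp.length + 1))]
      apply List.map_congr_left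
      intro k hk
      simp only [id, List.take_zero, lev_nil_left, List.length_take]
      have := (List.mem_range'_1).mp hk
      omega
    rw [hv0, levOuterA_spec base comp base 0 (by rw [List.drop_zero]) (by omega)]
    have hm : comp.length < ((List.range' 0 (comp.length + 1)).map
        (fun k => lev base (comp.take k))).length := by
      simp [List.length_range']
    rw [List.getD_eq_getElem _ _ hm, List.getElem_map, List.getElem_range']
    simp [List.take_length]

lemma headD_tails_map (f : List Char → Nat) (l : List Char) (d : Nat) :
    (l.tails.map f).headD d = f l := by
  cases l <;> simp

lemma tails_map_lev_nil (a : List Char) :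
    a.tails.map (fun s => lev s []) = (List.range (a.length + 1)).map (fun k => a.length - k) := by
  induction a with
  | nil => simp [lev]
  | cons x xs ih =>
    rw [List.tails_cons, List.map_cons, lev_nil_right, ih, List.length_cons]
    have hr : List.range (xs.length + 1 + 1) = 0 :: (List.range (xs.length + 1)).map Nat.succ :=
      List.range_succ_eq_map
    rw [hr, List.map_cons, List.map_map]
    congr 1
    apply List.map_congr_left
    intro k hk
    simp only [Function.comp_apply]
    omega

lemma colStepB_spec (y : Char) (ys : List Char) :
    ∀ xs, colStepB y xs (xs.tails.map (fun s => lev s ys))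
      = xs.tails.map (fun s => lev s (y :: ys)) := by
  intro xs
  induction xs with
  | nil => simp [colStepB, lev_nil_left]
  | cons x xs ih =>
    rw [List.tails_cons, List.map_cons, List.map_cons, colStepB, List.tail_cons, ih]
    congr 1
    rw [headD_tails_map, List.headD_cons, headD_tails_map, lev_cons_cons]

lemma colB_spec (a : List Char) : ∀ b, colB a b = a.tails.map (fun s => lev s b) := by
  intro b
  induction b with
  | nil => rw [colB, tails_map_lev_nil]
  | cons y ys ih => rw [colB, ih, colStepB_spec]

lemma levB_eq (a b : List Char) : levB a b = lev a b := by
  rw [levB, colB_spec, headD_tails_map]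

-- ===== selection (argmin) equivalence =====

def idLt (p q : Int × Int) : Prop := p.1 < q.1 ∨ (p.1 = q.1 ∧ p.2 < q.2)

def selStepA (st c : Int × Int × Int) : Int × Int × Int := if c.1 < st.1 then c else st

lemma sel_eq (L : List (Int × Int × Int)) :
    ∀ st : Int × Int × Int, (∀ c ∈ L, idLt st.2 c.2) →
      L.Pairwise (fun a b => idLt a.2 b.2) →
      L.foldl (fun st c => if c.1 < st.1 then c else st) st
        = L.foldl (fun b c => if tripLt c b then c else b) st := by
  induction L with
  | nil => intro st _ _; rfl
  | cons c cs ih =>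
    intro st hmem hpw
    have hid : idLt st.2 c.2 := hmem c List.mem_cons_self
    have hstep : (if tripLt c st then c else st) = (if c.1 < st.1 then c else st) := by
      by_cases h : c.1 < st.1
      · rw [if_pos h, if_pos]
        simp only [tripLt, Bool.or_eq_true, decide_eq_true_eq]
        exact Or.inl h
      · rw [if_neg h, if_neg]
        simp only [tripLt, Bool.or_eq_true, Bool.and_eq_true, decide_eq_true_eq, beq_iff_eq,
          not_or, not_and]
        rcases hid with h1 | ⟨h1, h2⟩ <;>
          exact ⟨h, fun _ => ⟨by omega, fun _ => by omega⟩⟩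
    rw [List.foldl_cons, List.foldl_cons, hstep]
    apply ih
    · intro d hd
      by_cases h : c.1 < st.1
      · rw [if_pos h]; exact (List.pairwise_cons.mp hpw).1 d hd
      · rw [if_neg h]; exact hmem d (List.mem_cons_of_mem _ hd)
    · exact (List.pairwise_cons.mp hpw).2

lemma sel_mem (L : List (Int × Int × Int)) :
    ∀ c : Int × Int × Int, L.foldl (fun b c => if tripLt c b then c else b) c ∈ c :: L := by
  induction L with
  | nil => intro c; simp
  | cons d ds ih =>
    intro c
    rw [List.foldl_cons]
    rcases List.mem_cons.mp (ih (if tripLt d c then d else c)) with h1 | h1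
    · rw [h1]
      by_cases hb : tripLt d c
      · rw [if_pos hb]; exact List.mem_cons_of_mem _ List.mem_cons_self
      · rw [if_neg hb]; exact List.mem_cons_self
    · exact List.mem_cons_of_mem _ (List.mem_cons_of_mem _ h1)

-- folding A's strict-min update over a list whose entries at or past the threshold can never
-- fire equals folding over the filtered list
lemma foldl_selA_filter (L : List (Int × Int × Int)) :
    ∀ s : Int × Int × Int, s.1 ≤ 9999 →
      L.foldl selStepA s = (L.filter (fun c => decide (c.1 < 9999))).foldl selStepA s := by
  induction L with
  | nil => intro s _; rfl
  | cons c cs ih =>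
    intro s hs
    by_cases hc : c.1 < 9999
    · rw [List.foldl_cons, List.filter_cons_of_pos (by simpa using hc), List.foldl_cons]
      apply ih
      unfold selStepA
      by_cases h : c.1 < s.1
      · rw [if_pos h]; omega
      · rw [if_neg h]; exact hs
    · rw [List.foldl_cons, List.filter_cons_of_neg (by simpa using hc)]
      have : selStepA s c = s := by
        unfold selStepA; rw [if_neg (by omega)]
      rw [this]
      exact ih s hs

lemma foldl_flatMap_map {α β γ δ : Type} (L : List α) (f : α → List β) (g : α → β → γ)
    (upd : δ → γ → δ) :
    ∀ s0 : δ, L.foldl (fun st a => (f a).foldl (fun st b => upd st (g a b)) st) s0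
      = (L.flatMap (fun a => (f a).map (g a))).foldl upd s0 := by
  induction L with
  | nil => intro s0; rfl
  | cons a L ih =>
    intro s0
    rw [List.foldl_cons, List.flatMap_cons, List.foldl_append, List.foldl_map, ih]

lemma flattenA (word : String) (s0 : Int × Int × Int) :
    (PySem.List.enumerate botPatterns 0).foldl (fun st ip =>
        (PySem.List.enumerate ip.2 0).foldl (fun st jp =>
          let l : Int := (levA word.toList jp.2.toList : Nat)
          if l < st.1 then (l, ip.1, jp.1) else st) st) s0
      = (botFlat.map (fun t => (((levA word.toList t.2.2.toList : Nat) : Int), t.1, t.2.1))).foldl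
          selStepA s0 := by
  have h := foldl_flatMap_map (PySem.List.enumerate botPatterns 0)
    (fun ip => PySem.List.enumerate ip.2 0)
    (fun ip jp => (((levA word.toList jp.2.toList : Nat) : Int), ip.1, jp.1)) selStepA s0
  unfold botFlat
  rw [List.map_flatMap]
  simp only [List.map_map]
  exact h

-- A's sentinel argmin + id≠-1 guard agrees with B's filter + lexicographic min for the
-- concrete six-candidate list (arbitrary distances d1..d6)
lemma sel6 (d1 d2 d3 d4 d5 d6 : Int) (r : List (List Int)) :
    (if (List.foldl selStepA ((9999 : Int), (-1 : Int), (-1 : Int))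
          [(d1, (0 : Int), (0 : Int)), (d2, 0, 1), (d3, 0, 2), (d4, 0, 3),
            (d5, 1, 0), (d6, 1, 1)]).2.1 ≠ -1 ∧
        (List.foldl selStepA ((9999 : Int), (-1 : Int), (-1 : Int))
          [(d1, (0 : Int), (0 : Int)), (d2, 0, 1), (d3, 0, 2), (d4, 0, 3),
            (d5, 1, 0), (d6, 1, 1)]).2.2 ≠ -1 then
      r ++ [[(List.foldl selStepA ((9999 : Int), (-1 : Int), (-1 : Int))
          [(d1, (0 : Int), (0 : Int)), (d2, 0, 1), (d3, 0, 2), (d4, 0, 3),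
            (d5, 1, 0), (d6, 1, 1)]).2.1,
        (List.foldl selStepA ((9999 : Int), (-1 : Int), (-1 : Int))
          [(d1, (0 : Int), (0 : Int)), (d2, 0, 1), (d3, 0, 2), (d4, 0, 3),
            (d5, 1, 0), (d6, 1, 1)]).2.2]]
    else r)
  = pickClose r ([(d1, (0 : Int), (0 : Int)), (d2, 0, 1), (d3, 0, 2), (d4, 0, 3),
        (d5, 1, 0), (d6, 1, 1)].filter (fun c => decide (c.1 < 9999))) := by
  have hL : ∀ c ∈ [(d1, (0 : Int), (0 : Int)), (d2, 0, 1), (d3, 0, 2), (d4, 0, 3),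
      (d5, 1, 0), (d6, 1, 1)], c.2.1 ≠ -1 ∧ c.2.2 ≠ -1 := by
    intro c hc
    simp only [List.mem_cons, List.not_mem_nil, or_false] at hc
    rcases hc with rfl | rfl | rfl | rfl | rfl | rfl <;> exact ⟨by norm_num, by norm_num⟩
  have hpw : List.Pairwise (fun a b : Int × Int × Int => idLt a.2 b.2)
      [(d1, (0 : Int), (0 : Int)), (d2, 0, 1), (d3, 0, 2), (d4, 0, 3), (d5, 1, 0), (d6, 1, 1)] := by
    simp only [List.pairwise_cons, List.mem_cons, List.not_mem_nil, or_false, idLt,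
      List.Pairwise.nil]
    norm_num
  rw [foldl_selA_filter _ ((9999 : Int), (-1 : Int), (-1 : Int)) (by norm_num)]
  rcases hFm : [(d1, (0 : Int), (0 : Int)), (d2, 0, 1), (d3, 0, 2), (d4, 0, 3),
      (d5, 1, 0), (d6, 1, 1)].filter (fun c => decide (c.1 < 9999)) with _ | ⟨c, cs⟩ <;>
    simp only [hFm]
  · rw [List.foldl_nil, if_neg (by norm_num)]; rfl
  · have hFsub : (c :: cs).Sublist [(d1, (0 : Int), (0 : Int)), (d2, 0, 1), (d3, 0, 2),
        (d4, 0, 3), (d5, 1, 0), (d6, 1, 1)] := by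
      rw [← hFm]; exact List.filter_sublist
    have hcmem : c ∈ [(d1, (0 : Int), (0 : Int)), (d2, 0, 1), (d3, 0, 2), (d4, 0, 3),
        (d5, 1, 0), (d6, 1, 1)].filter (fun c => decide (c.1 < 9999)) := by
      rw [hFm]; exact List.mem_cons_self
    have hclt : c.1 < 9999 := by
      have := List.mem_filter.mp hcmem
      simpa using this.2
    have hFpw : (c :: cs).Pairwise (fun a b : Int × Int × Int => idLt a.2 b.2) :=
      hpw.sublist hFsub
    rw [List.foldl_cons]
    have hinit : selStepA ((9999 : Int), (-1 : Int), (-1 : Int)) c = c := by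
      unfold selStepA; rw [if_pos (by omega)]
    rw [hinit]
    have hpcs := List.pairwise_cons.mp hFpw
    rw [show List.foldl selStepA c cs
        = List.foldl (fun (st c : Int × Int × Int) => if c.1 < st.1 then c else st) c cs from rfl,
      sel_eq cs c hpcs.1 hpcs.2]
    have hbL : (cs.foldl (fun b c => if tripLt c b then c else b) c)
        ∈ [(d1, (0 : Int), (0 : Int)), (d2, 0, 1), (d3, 0, 2), (d4, 0, 3),
            (d5, 1, 0), (d6, 1, 1)] :=
      hFsub.mem (sel_mem cs c)
    rw [if_pos (hL _ hbL)]; rfl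

lemma step_eq (result : List (List Int)) (word : String) :
    botLevStepA result word = botLevStepB result word := by
  unfold botLevStepA botLevStepB
  rw [flattenA]
  simp only [levA_eq, levB_eq]
  simp only [botFlat, botPatterns, PySem.List.enumerate_cons, PySem.List.enumerate_nil,
    List.flatMap_cons, List.flatMap_nil, List.map_cons, List.map_nil, List.cons_append,
    List.nil_append, List.append_nil, zero_add, Int.reduceAdd]
  exact sel6 ((lev word.toList "action".toList : Nat) : Int)
    ((lev word.toList "sliceoflife".toList : Nat) : Int)
    ((lev word.toList "horror".toList : Nat) : Int)
    ((lev word.toList "romance".toList : Nat) : Int)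
    ((lev word.toList "rekomendasi".toList : Nat) : Int)
    ((lev word.toList "saran".toList : Nat) : Int) result

-- ===== VERDICT (by name: the statement is the Claim_ definition above) =====
theorem botLev_spec : Claim_equal_botLev := by
  intro string _
  show botLev string = botLev_alt string
  unfold botLev botLev_alt
  have h : botLevStepA = botLevStepB := funext fun r => funext fun w => step_eq r w
  rw [h]
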